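-- pv_equiv track=rewrite | github.com/jAlfa007/cg-centroide-streamlit | core/generator_contour.py | _is_four_connected
-- ===== SOURCE A (Python) =====
-- from typing import Dict, Tuple, List, Set, Deque, Optional, DefaultDict, Callable, Any
-- from collections import deque, defaultdict
--
-- def _is_four_connected(cells: Set[Tuple[int,int]]) -> bool:
--     if not cells:
--         return False
--     visited: Set[Tuple[int,int]] = set()
--     start = next(iter(cells))
--     q: Deque[Tuple[int,int]] = deque([start])
--     visited.add(start)
--     while q:
--         i,j = q.popleft()
--         for di,dj in ((1,0),(-1,0),(0,1),(0,-1)):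
--             nb = (i+di, j+dj)
--             if nb in cells and nb not in visited:
--                 visited.add(nb)
--                 q.append(nb)
--     return visited == cells
-- ===== SOURCE B (Python) =====
-- def _is_four_connected(cells):
--     # Fixed-point saturation instead of BFS: grow `reached` by whole passes
--     # over the cells until no pass adds anything, then compare with cells.
--     if not cells:
--         return False
--     reached = {next(iter(cells))}
--     changed = True
--     while changed:
--         changed = False
--         for c in cells:
--             if c not in reached:
--                 i, j = c
--                 if ((i + 1, j) in reached or (i - 1, j) in reached
--                         or (i, j + 1) in reached or (i, j - 1) in reached):
--                     reached.add(c)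
--                     changed = True
--     return reached == cells
-- ===== Notes on version B (the rewrite author's own statement) =====
-- stated objective: alternative
-- what changed: Replaces the BFS with queue and visited set by a queue-free fixed-point saturation: repeated whole passes over the cells add any unreached cell with a reached neighbour until a pass adds nothing, then the reached set is compared with the cells.
import Mathlib
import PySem

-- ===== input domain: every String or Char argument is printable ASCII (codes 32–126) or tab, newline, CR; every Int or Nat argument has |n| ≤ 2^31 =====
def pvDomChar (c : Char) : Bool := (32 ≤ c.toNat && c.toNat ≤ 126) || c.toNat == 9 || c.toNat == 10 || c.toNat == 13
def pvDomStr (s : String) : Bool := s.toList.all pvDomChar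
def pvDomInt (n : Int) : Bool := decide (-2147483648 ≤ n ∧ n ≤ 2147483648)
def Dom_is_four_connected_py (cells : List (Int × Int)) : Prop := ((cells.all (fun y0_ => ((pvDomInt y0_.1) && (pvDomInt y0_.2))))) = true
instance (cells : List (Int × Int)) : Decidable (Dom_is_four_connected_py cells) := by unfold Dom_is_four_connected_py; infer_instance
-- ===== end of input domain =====

-- B replaces the BFS (queue + visited set) by a queue-free fixed-point saturation
-- over the cell set; same return value is proved for every input (alternative, not faster).


-- ===== PORT A =====
-- body of the inner `for di,dj in …` loop: visit one neighbour nb = u + d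
def bfsStep (cells : List (Int × Int)) (u : Int × Int)
    (st : PySem.Set (Int × Int) × List (Int × Int)) (d : Int × Int) :
    PySem.Set (Int × Int) × List (Int × Int) :=
  let nb := (u.1 + d.1, u.2 + d.2)
  if nb ∈ cells ∧ nb ∉ st.1 then (PySem.Set.add st.1 nb, st.2 ++ [nb]) else st

-- BFS while-loop: pop u from the queue, push its unvisited neighbours.
-- `fuel` only makes the while-loop structural; 2*|cells|+1 is proved sufficient below.
def bfsLoop (cells : List (Int × Int)) : Nat → PySem.Set (Int × Int) → List (Int × Int) → PySem.Set (Int × Int)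
  | 0, visited, _ => visited
  | fuel + 1, visited, q =>
    match q with
    | [] => visited
    | u :: q' =>
      let st := [((1 : Int), (0 : Int)), (-1, 0), (0, 1), (0, -1)].foldl (bfsStep cells u) (visited, q')
      bfsLoop cells fuel st.1 st.2

def is_four_connected_py (cells : List (Int × Int)) : Bool :=
  match cells with
  | [] => false
  | start :: _ =>
    let visited := PySem.Set.add PySem.Set.empty start
    let visited := bfsLoop cells (2 * cells.length + 1) visited [start]
    PySem.Set.equal visited (PySem.Set.ofList cells)

-- ===== PORT B =====
-- body of the inner `for c in cells` loop: add c if some neighbour is already reached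
def satStep (st : PySem.Set (Int × Int) × Bool) (c : Int × Int) :
    PySem.Set (Int × Int) × Bool :=
  if c ∉ st.1 ∧ ((c.1 + 1, c.2) ∈ st.1 ∨ (c.1 - 1, c.2) ∈ st.1 ∨
                 (c.1, c.2 + 1) ∈ st.1 ∨ (c.1, c.2 - 1) ∈ st.1)
  then (PySem.Set.add st.1 c, true) else st

-- `while changed:` loop — one whole pass over the cells per iteration; the Bool is the
-- `changed` flag.  `fuel` only makes the while-loop structural; |cells|+1 is proved sufficient below.
def satLoop (cells : List (Int × Int)) : Nat → PySem.Set (Int × Int) → PySem.Set (Int × Int)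
  | 0, reached => reached
  | fuel + 1, reached =>
    let st := cells.foldl satStep (reached, false)
    if st.2 then satLoop cells fuel st.1 else st.1

def is_four_connected_py_alt (cells : List (Int × Int)) : Bool :=
  match cells with
  | [] => false
  | start :: _ =>
    let reached := satLoop cells (cells.length + 1) (PySem.Set.add PySem.Set.empty start)
    PySem.Set.equal reached (PySem.Set.ofList cells)

-- ===== PRECONDITION & SPEC =====
def Spec_is_four_connected_py (cells : List (Int × Int)) (out : Bool) : Prop := out = is_four_connected_py_alt cells
instance (cells : List (Int × Int)) (out : Bool) : Decidable (Spec_is_four_connected_py cells out) := by unfold Spec_is_four_connected_py; infer_instance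

-- ===== CLAIM (what is proved, stated in full; the proofs are below) =====
def Claim_equal_is_four_connected_py : Prop := ∀ (cells : List (Int × Int)), Dom_is_four_connected_py cells → Spec_is_four_connected_py cells (is_four_connected_py cells)

-- ===== LEMMAS AND PROOFS =====

-- 4-adjacency of grid cells
def Adj (a b : Int × Int) : Prop :=
  b = (a.1 + 1, a.2) ∨ b = (a.1 - 1, a.2) ∨ b = (a.1, a.2 + 1) ∨ b = (a.1, a.2 - 1)

-- reachability inside the cell set
def Reach (cells : List (Int × Int)) (a b : Int × Int) : Prop :=
  Relation.ReflTransGen (fun x y => x ∈ cells ∧ y ∈ cells ∧ Adj x y) a b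

lemma adj_symm {a b : Int × Int} (h : Adj a b) : Adj b a := by
  obtain ⟨a1, a2⟩ := a
  rcases h with h | h | h | h <;> subst h <;>
    simp [Adj, Prod.ext_iff]

lemma reach_tail {cells : List (Int × Int)} {s a b : Int × Int}
    (h : Reach cells s a) (ha : a ∈ cells) (hb : b ∈ cells) (hadj : Adj a b) :
    Reach cells s b :=
  Relation.ReflTransGen.tail h ⟨ha, hb, hadj⟩

-- BFS loop invariant
def InvA (cells : List (Int × Int)) (start : Int × Int)
    (v q : List (Int × Int)) : Prop :=
  start ∈ v ∧ (∀ x ∈ q, x ∈ v) ∧ (∀ x ∈ v, x ∈ cells) ∧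
  (∀ x ∈ v, Reach cells start x) ∧
  (∀ u ∈ v, u ∈ q ∨ ∀ w, w ∈ cells → Adj u w → w ∈ v) ∧ v.Nodup

-- everything the inner neighbour loop of A guarantees
lemma bfsScan_facts (cells : List (Int × Int)) (u : Int × Int) :
    ∀ (ds : List (Int × Int)) (v q : List (Int × Int)),
    (∀ d ∈ ds, Adj u (u.1 + d.1, u.2 + d.2)) →
    (∀ x ∈ v, x ∈ (ds.foldl (bfsStep cells u) (v, q)).1) ∧
    (∀ x ∈ q, x ∈ (ds.foldl (bfsStep cells u) (v, q)).2) ∧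
    (∀ x ∈ (ds.foldl (bfsStep cells u) (v, q)).1,
        x ∈ v ∨ (x ∈ cells ∧ Adj u x ∧ x ∈ (ds.foldl (bfsStep cells u) (v, q)).2)) ∧
    (∀ x ∈ (ds.foldl (bfsStep cells u) (v, q)).2, x ∈ q ∨ x ∈ (ds.foldl (bfsStep cells u) (v, q)).1) ∧
    ((ds.foldl (bfsStep cells u) (v, q)).1.length + q.length
       = (ds.foldl (bfsStep cells u) (v, q)).2.length + v.length) ∧
    (v.Nodup → (ds.foldl (bfsStep cells u) (v, q)).1.Nodup) ∧
    (∀ d ∈ ds, (u.1 + d.1, u.2 + d.2) ∈ cells → (u.1 + d.1, u.2 + d.2) ∈ (ds.foldl (bfsStep cells u) (v, q)).1) := by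
  intro ds
  induction ds with
  | nil =>
    intro v q _
    simp only [List.foldl_nil]
    exact ⟨fun x h => h, fun x h => h, fun x h => Or.inl h, fun x h => Or.inl h,
      by omega, fun h => h, by simp⟩
  | cons d ds ih =>
    intro v q hadj
    simp only [List.foldl_cons]
    by_cases hc : (u.1 + d.1, u.2 + d.2) ∈ cells ∧ (u.1 + d.1, u.2 + d.2) ∉ v
    · have hstep : bfsStep cells u (v, q) d
          = (v ++ [(u.1 + d.1, u.2 + d.2)], q ++ [(u.1 + d.1, u.2 + d.2)]) := by
        simp only [bfsStep]
        rw [if_pos hc, PySem.Set.add_of_not_mem hc.2]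
      rw [hstep]
      obtain ⟨m1, m2, m3, m4, m5, m6, m7⟩ :=
        ih (v ++ [(u.1 + d.1, u.2 + d.2)]) (q ++ [(u.1 + d.1, u.2 + d.2)])
          (fun e he => hadj e (List.mem_cons_of_mem _ he))
      refine ⟨?_, ?_, ?_, ?_, ?_, ?_, ?_⟩
      · exact fun x hx => m1 x (List.mem_append_left _ hx)
      · exact fun x hx => m2 x (List.mem_append_left _ hx)
      · intro x hx
        rcases m3 x hx with hv | ⟨hcell, hA, hq⟩
        · rcases List.mem_append.1 hv with hv | hv
          · exact Or.inl hv
          · simp only [List.mem_singleton] at hv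
            subst hv
            exact Or.inr ⟨hc.1, hadj d (by simp),
              m2 _ (by simp)⟩
        · exact Or.inr ⟨hcell, hA, hq⟩
      · intro x hx
        rcases m4 x hx with hq | h1
        · rcases List.mem_append.1 hq with hq | hq
          · exact Or.inl hq
          · simp only [List.mem_singleton] at hq
            subst hq
            exact Or.inr (m1 _ (by simp))
        · exact Or.inr h1
      · have h5 := m5
        simp only [List.length_append, List.length_singleton] at h5
        omega
      · intro hn
        refine m6 (List.Nodup.append hn (List.nodup_singleton _) ?_)
        intro a hav hab
        simp only [List.mem_singleton] at hab
        subst hab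
        exact hc.2 hav
      · intro e he hecell
        rcases List.mem_cons.1 he with rfl | he
        · exact m1 _ (by simp)
        · exact m7 e he hecell
    · have hstep : bfsStep cells u (v, q) d = (v, q) := by
        simp only [bfsStep]
        rw [if_neg hc]
      rw [hstep]
      obtain ⟨m1, m2, m3, m4, m5, m6, m7⟩ :=
        ih v q (fun e he => hadj e (List.mem_cons_of_mem _ he))
      refine ⟨m1, m2, m3, m4, m5, m6, ?_⟩
      intro e he hecell
      rcases List.mem_cons.1 he with rfl | he
      · have : (u.1 + e.1, u.2 + e.2) ∈ v := by
          by_contra hnv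
          exact hc ⟨hecell, hnv⟩
        exact m1 _ this
      · exact m7 e he hecell

lemma nodup_length_le_card {v cells : List (Int × Int)}
    (hn : v.Nodup) (hsub : ∀ x ∈ v, x ∈ cells) :
    v.length ≤ cells.toFinset.card := by
  classical
  calc v.length = v.toFinset.card := (List.toFinset_card_of_nodup hn).symm
    _ ≤ cells.toFinset.card := by
        apply Finset.card_le_card
        intro x hx
        simp only [List.mem_toFinset] at hx ⊢
        exact hsub x hx

-- the BFS computes exactly the cells reachable from start
lemma bfsLoop_mem (cells : List (Int × Int)) (start : Int × Int) :
    ∀ (fuel : Nat) (v q : List (Int × Int)), InvA cells start v q →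
    q.length + 2 * (cells.toFinset.card - v.length) < fuel →
    ∀ x, x ∈ bfsLoop cells fuel v q ↔ (x ∈ cells ∧ Reach cells start x) := by
  intro fuel
  induction fuel with
  | zero => intro v q _ hm; exact absurd hm (Nat.not_lt_zero _)
  | succ fuel ih =>
    intro v q hInv hm x
    obtain ⟨i1, i2, i3, i4, i5, i6⟩ := hInv
    cases q with
    | nil =>
      show x ∈ v ↔ _
      constructor
      · intro hx; exact ⟨i3 x hx, i4 x hx⟩
      · rintro ⟨hxc, hr⟩
        have key : ∀ y, Reach cells start y → y ∈ v := by
          intro y hy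
          induction hy with
          | refl => exact i1
          | tail h1 h2 ihy =>
            obtain ⟨hb, hyc, hadj⟩ := h2
            rcases i5 _ ihy with h | h
            · simp at h
            · exact h _ hyc hadj
        exact key x hr
    | cons u q' =>
      obtain ⟨m1, m2, m3, m4, m5, m6, m7⟩ :=
        bfsScan_facts cells u [((1 : Int), (0 : Int)), (-1, 0), (0, 1), (0, -1)] v q'
          (by intro d hd; fin_cases hd <;> simp [Adj, Prod.ext_iff] <;> omega)
      have hu_v : u ∈ v := i2 u (by simp)
      have hu_cells : u ∈ cells := i3 u hu_v
      have hu_reach : Reach cells start u := i4 u hu_v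
      have hclosed : ∀ w, w ∈ cells → Adj u w →
          w ∈ ([((1:Int),(0:Int)),(-1,0),(0,1),(0,-1)].foldl (bfsStep cells u) (v, q')).1 := by
        intro w hw hA
        rcases hA with h | h | h | h <;> subst h
        · have e : ((u.1 + (1:Int), u.2 + (0:Int))) = (u.1 + 1, u.2) := by
            simp
          exact e ▸ m7 (1, 0) (by simp) (by rw [e]; exact hw)
        · have e : ((u.1 + (-1:Int), u.2 + (0:Int))) = (u.1 - 1, u.2) := by
            simp [Prod.ext_iff]; omega
          exact e ▸ m7 (-1, 0) (by simp) (by rw [e]; exact hw)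
        · have e : ((u.1 + (0:Int), u.2 + (1:Int))) = (u.1, u.2 + 1) := by
            simp
          exact e ▸ m7 (0, 1) (by simp) (by rw [e]; exact hw)
        · have e : ((u.1 + (0:Int), u.2 + (-1:Int))) = (u.1, u.2 - 1) := by
            simp [Prod.ext_iff]; omega
          exact e ▸ m7 (0, -1) (by simp) (by rw [e]; exact hw)
      have hred : bfsLoop cells (fuel + 1) v (u :: q')
          = bfsLoop cells fuel
              ([((1:Int),(0:Int)),(-1,0),(0,1),(0,-1)].foldl (bfsStep cells u) (v, q')).1
              ([((1:Int),(0:Int)),(-1,0),(0,1),(0,-1)].foldl (bfsStep cells u) (v, q')).2 := rfl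
      rw [hred]
      have i3' : ∀ y ∈ ([((1:Int),(0:Int)),(-1,0),(0,1),(0,-1)].foldl (bfsStep cells u) (v, q')).1, y ∈ cells := by
        intro y hy
        rcases m3 y hy with h | ⟨h, _, _⟩
        · exact i3 y h
        · exact h
      have hnod : ([((1:Int),(0:Int)),(-1,0),(0,1),(0,-1)].foldl (bfsStep cells u) (v, q')).1.Nodup := m6 i6
      have hvlen : v.length ≤ ([((1:Int),(0:Int)),(-1,0),(0,1),(0,-1)].foldl (bfsStep cells u) (v, q')).1.length := by
        have h := nodup_length_le_card i6 m1
        rwa [List.toFinset_card_of_nodup hnod] at h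
      have hDlen : ([((1:Int),(0:Int)),(-1,0),(0,1),(0,-1)].foldl (bfsStep cells u) (v, q')).1.length
          ≤ cells.toFinset.card := nodup_length_le_card hnod i3'
      have hvD : v.length ≤ cells.toFinset.card := nodup_length_le_card i6 i3
      apply ih
      · refine ⟨m1 start i1, ?_, i3', ?_, ?_, hnod⟩
        · intro y hy
          rcases m4 y hy with h | h
          · exact m1 y (i2 y (List.mem_cons_of_mem _ h))
          · exact h
        · intro y hy
          rcases m3 y hy with h | ⟨hc, hA, _⟩
          · exact i4 y h
          · exact reach_tail hu_reach hu_cells hc hA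
        · intro w hw
          rcases m3 w hw with hv | ⟨_, _, hq2⟩
          · rcases i5 w hv with hq | hcl
            · rcases List.mem_cons.1 hq with rfl | hq'
              · exact Or.inr hclosed
              · exact Or.inl (m2 w hq')
            · exact Or.inr (fun z hz hA => m1 z (hcl z hz hA))
          · exact Or.inl hq2
      · simp only [List.length_cons] at hm
        omega

-- saturation loop invariant
def InvB (cells : List (Int × Int)) (start : Int × Int) (r : List (Int × Int)) : Prop :=
  start ∈ r ∧ (∀ x ∈ r, x ∈ cells) ∧ (∀ x ∈ r, Reach cells start x) ∧ r.Nodup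

-- everything one saturation pass of B guarantees
lemma satPass_facts (cells : List (Int × Int)) (start : Int × Int) :
    ∀ (l : List (Int × Int)) (r : List (Int × Int)) (b : Bool),
    (∀ c ∈ l, c ∈ cells) →
    (∀ x ∈ r, x ∈ (l.foldl satStep (r, b)).1) ∧
    ((∀ x ∈ r, x ∈ cells ∧ Reach cells start x) →
        ∀ x ∈ (l.foldl satStep (r, b)).1, x ∈ cells ∧ Reach cells start x) ∧
    (∀ c ∈ l, ((c.1 + 1, c.2) ∈ r ∨ (c.1 - 1, c.2) ∈ r ∨
               (c.1, c.2 + 1) ∈ r ∨ (c.1, c.2 - 1) ∈ r) → c ∈ (l.foldl satStep (r, b)).1) ∧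
    ((l.foldl satStep (r, b)).2 = false → (l.foldl satStep (r, b)).1 = r ∧ b = false) ∧
    (r.Nodup → (l.foldl satStep (r, b)).1.Nodup) ∧
    (r.length ≤ (l.foldl satStep (r, b)).1.length) ∧
    ((l.foldl satStep (r, b)).2 = true → b = true ∨ r.length < (l.foldl satStep (r, b)).1.length) := by
  intro l
  induction l with
  | nil =>
    intro r b _
    simp only [List.foldl_nil]
    refine ⟨?_, ?_, ?_, ?_, ?_, ?_, ?_⟩
    · exact fun x h => h
    · exact fun h => h
    · intro c hc
      simp at hc
    · exact fun h => ⟨trivial, h⟩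
    · exact fun h => h
    · exact le_refl _
    · exact fun h => Or.inl h
  | cons c l ih =>
    intro r b hl
    simp only [List.foldl_cons]
    by_cases hc : c ∉ r ∧ ((c.1 + 1, c.2) ∈ r ∨ (c.1 - 1, c.2) ∈ r ∨
        (c.1, c.2 + 1) ∈ r ∨ (c.1, c.2 - 1) ∈ r)
    · have hstep : satStep (r, b) c = (r ++ [c], true) := by
        simp only [satStep]
        rw [if_pos hc, PySem.Set.add_of_not_mem hc.1]
      rw [hstep]
      obtain ⟨s1, s2, s3, s4, s5, s6, s7⟩ :=
        ih (r ++ [c]) true (fun e he => hl e (List.mem_cons_of_mem _ he))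
      have hcc : c ∈ cells := hl c (by simp)
      refine ⟨?_, ?_, ?_, ?_, ?_, ?_, ?_⟩
      · exact fun x hx => s1 x (List.mem_append_left _ hx)
      · intro hr
        apply s2
        intro x hx
        rcases List.mem_append.1 hx with hx | hx
        · exact hr x hx
        · simp only [List.mem_singleton] at hx
          subst hx
          refine ⟨hcc, ?_⟩
          rcases hc.2 with h | h | h | h
        
          · exact reach_tail (hr _ h).2 (hr _ h).1 hcc (adj_symm (Or.inl rfl))
          · exact reach_tail (hr _ h).2 (hr _ h).1 hcc (adj_symm (Or.inr (Or.inl rfl)))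
          · exact reach_tail (hr _ h).2 (hr _ h).1 hcc (adj_symm (Or.inr (Or.inr (Or.inl rfl))))
          · exact reach_tail (hr _ h).2 (hr _ h).1 hcc (adj_symm (Or.inr (Or.inr (Or.inr rfl))))
      · intro e he hne
        rcases List.mem_cons.1 he with rfl | he
        · exact s1 _ (by simp)
        · refine s3 e he ?_
          rcases hne with h | h | h | h
          · exact Or.inl (List.mem_append_left _ h)
          · exact Or.inr (Or.inl (List.mem_append_left _ h))
          · exact Or.inr (Or.inr (Or.inl (List.mem_append_left _ h)))
          · exact Or.inr (Or.inr (Or.inr (List.mem_append_left _ h)))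
      · intro hf
        rcases s4 hf with ⟨_, h⟩
        exact absurd h (by simp)
      · intro hn
        apply s5
        refine List.Nodup.append hn (List.nodup_singleton _) ?_
        intro a hav hab
        simp only [List.mem_singleton] at hab
        subst hab
        exact hc.1 hav
      · calc r.length ≤ (r ++ [c]).length := by simp
          _ ≤ _ := s6
      · intro _
        refine Or.inr ?_
        calc r.length < (r ++ [c]).length := by simp
          _ ≤ _ := s6
    · have hstep : satStep (r, b) c = (r, b) := by
        simp only [satStep]
        rw [if_neg hc]
      rw [hstep]
      obtain ⟨s1, s2, s3, s4, s5, s6, s7⟩ :=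
        ih r b (fun e he => hl e (List.mem_cons_of_mem _ he))
      refine ⟨s1, s2, ?_, s4, s5, s6, s7⟩
      intro e he hne
      rcases List.mem_cons.1 he with rfl | he
      · have : e ∈ r := by
          by_contra hne'
          exact hc ⟨hne', hne⟩
        exact s1 _ this
      · exact s3 e he hne

-- the saturation computes exactly the cells reachable from start
lemma satLoop_mem (cells : List (Int × Int)) (start : Int × Int) :
    ∀ (fuel : Nat) (r : List (Int × Int)), InvB cells start r →
    cells.toFinset.card - r.length < fuel →
    ∀ x, x ∈ satLoop cells fuel r ↔ (x ∈ cells ∧ Reach cells start x) := by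
  intro fuel
  induction fuel with
  | zero => intro r _ hm; exact absurd hm (Nat.not_lt_zero _)
  | succ fuel ih =>
    intro r hInv hm x
    obtain ⟨i1, i2, i3, i4⟩ := hInv
    obtain ⟨s1, s2, s3, s4, s5, s6, s7⟩ :=
      satPass_facts cells start cells r false (fun c h => h)
    have hred : satLoop cells (fuel + 1) r
        = if (cells.foldl satStep (r, false)).2 then
            satLoop cells fuel (cells.foldl satStep (r, false)).1
          else (cells.foldl satStep (r, false)).1 := rfl
    rw [hred]
    cases hst2 : (cells.foldl satStep (r, false)).2 with
    | false =>
      rw [if_neg (by simp)]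
      rw [(s4 hst2).1]
      constructor
      · intro hx; exact ⟨i2 x hx, i3 x hx⟩
      · rintro ⟨hxc, hr⟩
        have key : ∀ y, Reach cells start y → y ∈ r := by
          intro y hy
          induction hy with
          | refl => exact i1
          | tail h1 h2 ihy =>
            obtain ⟨hb, hyc, hadj⟩ := h2
            have hmem : _ := s3 _ hyc
            rw [(s4 hst2).1] at hmem
            rcases hadj with h | h | h | h <;> subst h
            · refine hmem (Or.inr (Or.inl ?_))
              simpa using ihy
            · refine hmem (Or.inl ?_)
              simpa using ihy
            · refine hmem (Or.inr (Or.inr (Or.inr ?_)))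
              simpa using ihy
            · refine hmem (Or.inr (Or.inr (Or.inl ?_)))
              simpa using ihy
        exact key x hr
    | true =>
      rw [if_pos rfl]
      have i2' : ∀ y ∈ (cells.foldl satStep (r, false)).1, y ∈ cells :=
        fun y hy => (s2 (fun z hz => ⟨i2 z hz, i3 z hz⟩) y hy).1
      have hnod : (cells.foldl satStep (r, false)).1.Nodup := s5 i4
      have hgrow : r.length < (cells.foldl satStep (r, false)).1.length := by
        rcases s7 hst2 with h | h
        · exact absurd h (by simp)
        · exact h
      have hDlen : (cells.foldl satStep (r, false)).1.length ≤ cells.toFinset.card :=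
        nodup_length_le_card hnod i2'
      apply ih
      · exact ⟨s1 start i1, i2',
          fun y hy => (s2 (fun z hz => ⟨i2 z hz, i3 z hz⟩) y hy).2, hnod⟩
      · omega

-- the two ports agree on every input
lemma ports_agree : ∀ cells, is_four_connected_py cells = is_four_connected_py_alt cells := by
  intro cells
  cases cells with
  | nil => rfl
  | cons start rest =>
    have hstart : start ∈ start :: rest := by simp
    have hD1 : 1 ≤ (start :: rest).toFinset.card :=
      Finset.card_pos.2 ⟨start, by simp⟩
    have hDle : (start :: rest).toFinset.card ≤ (start :: rest).length :=
      List.toFinset_card_le _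
    have invA : InvA (start :: rest) start [start] [start] := by
      refine ⟨by simp, fun x h => h, ?_, ?_, fun u hu => Or.inl hu, List.nodup_singleton _⟩
      · intro x hx
        simp only [List.mem_singleton] at hx
        subst hx; exact hstart
      · intro x hx
        simp only [List.mem_singleton] at hx
        subst hx; exact Relation.ReflTransGen.refl
    have invB : InvB (start :: rest) start [start] := by
      refine ⟨by simp, ?_, ?_, List.nodup_singleton _⟩
      · intro x hx
        simp only [List.mem_singleton] at hx
        subst hx; exact hstart
      · intro x hx
        simp only [List.mem_singleton] at hx
        subst hx; exact Relation.ReflTransGen.refl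
    have hA := bfsLoop_mem (start :: rest) start (2 * (start :: rest).length + 1)
      [start] [start] invA (by simp only [List.length_singleton]; omega)
    have hB := satLoop_mem (start :: rest) start ((start :: rest).length + 1)
      [start] invB (by simp only [List.length_singleton]; omega)
    have hmem : ∀ x, x ∈ bfsLoop (start :: rest) (2 * (start :: rest).length + 1) [start] [start]
        ↔ x ∈ satLoop (start :: rest) ((start :: rest).length + 1) [start] :=
      fun x => (hA x).trans (hB x).symm
    have hinit : PySem.Set.add PySem.Set.empty start = [start] := rfl
    show PySem.Set.equal (bfsLoop (start :: rest) (2 * (start :: rest).length + 1)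
        (PySem.Set.add PySem.Set.empty start) [start]) (PySem.Set.ofList (start :: rest))
      = PySem.Set.equal (satLoop (start :: rest) ((start :: rest).length + 1)
        (PySem.Set.add PySem.Set.empty start)) (PySem.Set.ofList (start :: rest))
    rw [hinit]
    rw [Bool.eq_iff_iff, PySem.Set.equal_iff, PySem.Set.equal_iff]
    constructor
    · intro h x
      exact (hmem x).symm.trans (h x)
    · intro h x
      exact (hmem x).trans (h x)

-- ===== VERDICT (by name: the statement is the Claim_ definition above) =====
theorem is_four_connected_py_spec : Claim_equal_is_four_connected_py := by
  unfold Claim_equal_is_four_connected_py Spec_is_four_connected_py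
  intro cells _
  exact ports_agree cells
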